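-- pv_equiv track=rewrite | github.com/Sandhya2904/A2A-Trip-Planner | app/services/wikimedia_places_provider.py | _prefer_cards_with_images
-- ===== SOURCE A (Python) =====
-- from typing import Any, Dict, List, Optional
--
-- def _prefer_cards_with_images(
--
--     cards: List[Dict[str, Any]],
--     limit: int,
-- ) -> List[Dict[str, Any]]:
--     with_real_images = [
--         card
--         for card in cards
--         if card.get("image")
--         and "images.unsplash.com" not in str(card.get("image"))
--     ]
--
--     without_real_images = [
--         card
--         for card in cards
--         if card not in with_real_images
--     ]
--
--     ordered = [*with_real_images, *without_real_images]
--
--     return ordered[:limit]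
-- ===== SOURCE B (Python) =====
-- def _prefer_cards_with_images(cards, limit):
--     return sorted(
--         cards,
--         key=lambda c: 0
--         if (c.get("image") and "images.unsplash.com" not in str(c.get("image")))
--         else 1,
--     )[:limit]
-- ===== Notes on version B (the rewrite author's own statement) =====
-- stated objective: idiomatic
-- what changed: Replaces the two list comprehensions (the second re-scanning the first with a quadratic 'card not in' membership test) and concatenation with a single stable sort on a 0/1 key that is the negation of the real-image predicate, then a slice.
import Mathlib
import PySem

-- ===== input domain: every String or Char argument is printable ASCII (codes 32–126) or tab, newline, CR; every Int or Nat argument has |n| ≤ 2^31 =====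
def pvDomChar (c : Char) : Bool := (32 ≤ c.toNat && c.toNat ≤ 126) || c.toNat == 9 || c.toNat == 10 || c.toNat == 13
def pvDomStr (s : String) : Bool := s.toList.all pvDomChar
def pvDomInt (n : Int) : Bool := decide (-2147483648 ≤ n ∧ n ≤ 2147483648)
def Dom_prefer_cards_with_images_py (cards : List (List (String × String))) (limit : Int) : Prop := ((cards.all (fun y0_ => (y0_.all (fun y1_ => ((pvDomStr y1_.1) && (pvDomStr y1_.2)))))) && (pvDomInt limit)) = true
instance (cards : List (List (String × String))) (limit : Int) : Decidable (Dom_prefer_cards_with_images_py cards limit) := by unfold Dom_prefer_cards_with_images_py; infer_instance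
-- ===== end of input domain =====

-- B replaces A's two comprehensions (the second with a quadratic 'not in' scan of the first)
-- by a single stable sort on the 0/1 negation of the real-image predicate, then the slice.

-- ===== PORT A =====
-- the comprehension condition: card.get("image") is truthy and "images.unsplash.com" not in it
def pvRealImage (card : List (String × String)) : Bool :=
  -- card.get("image"): first-match lookup in the association list (dict keys are unique)
  match card.lookup "image" with
  | none => false
  | some s => s ≠ "" && !(PySem.Str.isIn "images.unsplash.com" s)

def prefer_cards_with_images_py (cards : List (List (String × String))) (limit : Int) : List (List (String × String)) :=
  let with_real_images := cards.filter (fun card => pvRealImage card)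
  let without_real_images := cards.filter (fun card => !(with_real_images.contains card))
  let ordered := with_real_images ++ without_real_images
  PySem.List.slice ordered none (some limit)

-- ===== PORT B =====
def prefer_cards_with_images_py_alt (cards : List (List (String × String))) (limit : Int) : List (List (String × String)) :=
  PySem.List.slice
    (PySem.List.sorted cards (fun c => if pvRealImage c then (0 : Int) else 1) false)
    none (some limit)

-- ===== PRECONDITION & SPEC =====
def Spec_prefer_cards_with_images_py (cards : List (List (String × String))) (limit : Int) (out : List (List (String × String))) : Prop := out = prefer_cards_with_images_py_alt cards limit
instance (cards : List (List (String × String))) (limit : Int) (out : List (List (String × String))) : Decidable (Spec_prefer_cards_with_images_py cards limit out) := by unfold Spec_prefer_cards_with_images_py; infer_instance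

-- ===== CLAIM (what is proved, stated in full; the proofs are below) =====
def Claim_equal_prefer_cards_with_images_py : Prop := ∀ (cards : List (List (String × String))) (limit : Int), Dom_prefer_cards_with_images_py cards limit → Spec_prefer_cards_with_images_py cards limit (prefer_cards_with_images_py cards limit)

-- ===== LEMMAS AND PROOFS =====

-- insertBy passes over a block it never inserts before
theorem pv_insertBy_append {α : Type} (before : α → α → Bool) (x : α) (ys zs : List α)
    (h : ∀ y ∈ ys, before x y = false) :
    PySem.List.insertBy before x (ys ++ zs) = ys ++ PySem.List.insertBy before x zs := by
  induction ys with
  | nil => rfl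
  | cons y ys ih =>
    simp only [List.cons_append, PySem.List.insertBy, h y (by simp)]
    simp only [Bool.false_eq_true, if_false]
    rw [ih (fun y hy => h y (by simp [hy]))]

-- a stable insertion sort on a 0/1 key is the stable partition
theorem pv_sorted_partition {α : Type} (p : α → Bool) (xs acc0 acc1 : List α)
    (h0 : ∀ y ∈ acc0, p y = true) (h1 : ∀ y ∈ acc1, p y = false) :
    xs.foldl (fun acc x =>
        PySem.List.insertBy
          (fun a b => decide ((if p a then (0 : Int) else 1) < (if p b then 0 else 1))) x acc)
      (acc0 ++ acc1)
    = (acc0 ++ xs.filter p) ++ (acc1 ++ xs.filter (fun y => !p y)) := by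
  induction xs generalizing acc0 acc1 with
  | nil => simp
  | cons x xs ih =>
    set before := fun a b => decide ((if p a then (0 : Int) else 1) < (if p b then 0 else 1)) with hb
    have hstep : PySem.List.insertBy before x (acc0 ++ acc1)
        = if p x then (acc0 ++ [x]) ++ acc1 else acc0 ++ (acc1 ++ [x]) := by
      by_cases hp : p x = true
      · have hpre : ∀ y ∈ acc0, before x y = false := by
          intro y hy; simp [hb, hp, h0 y hy]
        rw [pv_insertBy_append before x acc0 acc1 hpre]
        cases acc1 with
        | nil => simp [hp, PySem.List.insertBy]
        | cons z zs =>
          have hz : before x z = true := by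
            simp [hb, hp, h1 z (by simp)]
          simp [PySem.List.insertBy, hz, hp]
      · have hall : ∀ y ∈ acc0 ++ acc1, before x y = false := by
          intro y hy
          simp only [hb]
          simp only [Bool.not_eq_true] at hp
          simp [hp]
          split <;> omega
        rw [PySem.List.insertBy_of_forall_not_before before x (acc0 ++ acc1) hall]
        simp [hp]
    simp only [List.foldl_cons]
    rw [hstep]
    by_cases hp : p x = true
    · rw [if_pos hp]
      rw [ih (acc0 ++ [x]) acc1
        (by intro y hy; rcases List.mem_append.1 hy with h | h
            · exact h0 y h
            · simp at h; subst h; exact hp) h1]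
      simp [hp]
    · rw [if_neg hp]
      rw [ih acc0 (acc1 ++ [x]) h0
        (by intro y hy; rcases List.mem_append.1 hy with h | h
            · exact h1 y h
            · simp at h; subst h; simpa using hp)]
      simp only [Bool.not_eq_true] at hp
      simp [hp, List.append_assoc]

theorem pv_sorted_eq_partition (p : List (String × String) → Bool) (xs : List (List (String × String))) :
    PySem.List.sorted xs (fun c => if p c then (0 : Int) else 1) false
      = xs.filter p ++ xs.filter (fun y => !p y) := by
  rw [PySem.List.sorted_eq_foldl_insertBy]
  simpa using pv_sorted_partition p xs [] [] (by simp) (by simp)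

-- A's second comprehension just filters out the cards satisfying the predicate
theorem pv_without_eq (xs : List (List (String × String))) :
    xs.filter (fun c => !((xs.filter (fun card => pvRealImage card)).contains c))
      = xs.filter (fun y => !pvRealImage y) := by
  apply List.filter_congr
  intro c hc
  by_cases hp : pvRealImage c = true
  · simp [hp, List.mem_filter, hc]
  · simp only [Bool.not_eq_true] at hp
    simp [List.mem_filter, hp]

-- ===== VERDICT (by name: the statement is the Claim_ definition above) =====
theorem prefer_cards_with_images_py_spec : Claim_equal_prefer_cards_with_images_py := by
  intro cards limit _
  unfold Spec_prefer_cards_with_images_py prefer_cards_with_images_py prefer_cards_with_images_py_alt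
  simp only [pv_sorted_eq_partition, pv_without_eq]
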